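/- GENERATED by farm/worked/mk_tree_copies.py from farm/worked/square/Proof.lean (a worked proof of the farm's unit `square`,
   accepted by the verdict) — do not edit. -/
import Vorbis.Spec.Units.square

open X86 X86.User Asan Vorbis

set_option maxRecDepth 4000
set_option maxHeartbeats 4000000

theorem Vorbis.Spec.Worked.square_ok : Vorbis.Spec.square.Statement := by
  intro Lay hLay μ hμ u₀ hcode others frames u ret he hpre
  v_entry he
  have hsp := hpre.rsp
  u_walk hcode [hμ.vendor] span [Vorbis.L.textLo, Vorbis.L.textHi] side (v_side)
  refine ReachVia.done ?_
  v_returned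
  exact w_mem
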